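-- pv_equiv track=rewrite | github.com/holgern/toktrail | toktrail/cli.py | _strip_statusline_sections
-- ===== SOURCE A (Python) =====
-- def _strip_statusline_sections(text: str) -> str:
--     lines = text.splitlines()
--     stripped: list[str] = []
--     skip_mode: str | None = None
--     statusline_section_headers = {
--         "[statusline]",
--         "[statusline.cache]",
--         "[statusline.thresholds]",
--     }
--     for line in lines:
--         stripped_line = line.strip()
--         if stripped_line in statusline_section_headers:
--             skip_mode = "statusline"
--             continue
--         if stripped_line == "[[context_window]]":
--             skip_mode = "context_window"
--             continue
--         if stripped_line.startswith("[") and skip_mode is not None: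
--             skip_mode = None
--         if skip_mode is None:
--             stripped.append(line)
--     return "\n".join(stripped).strip()
-- ===== SOURCE B (Python) =====
-- def _strip_statusline_sections(text: str) -> str:
--     SKIP = {
--         "[statusline]",
--         "[statusline.cache]",
--         "[statusline.thresholds]",
--         "[[context_window]]",
--     }
--     # Phase 1: group lines into a preamble plus header-led sections.
--     preamble: list[str] = []
--     sections: list[list[str]] = []
--     cur: list[str] | None = None
--     for line in text.splitlines():
--         if line.strip().startswith("["):
--             if cur is not None:
--                 sections.append(cur)
--             cur = [line]
--         elif cur is None:
--             preamble.append(line)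
--         else:
--             cur.append(line)
--     if cur is not None:
--         sections.append(cur)
--     # Phase 2: keep only sections whose header is not one to strip.
--     kept = list(preamble)
--     for sec in sections:
--         if sec[0].strip() not in SKIP:
--             kept.extend(sec)
--     return "\n".join(kept).strip()
-- ===== Notes on version B (the rewrite author's own statement) =====
-- stated objective: alternative
-- what changed: Replaces A's single scan with a skip-mode flag by a two-phase pass: first group the lines into a preamble plus header-led sections, then filter out sections whose header is a statusline/context_window header and flatten back.
import Mathlib
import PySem

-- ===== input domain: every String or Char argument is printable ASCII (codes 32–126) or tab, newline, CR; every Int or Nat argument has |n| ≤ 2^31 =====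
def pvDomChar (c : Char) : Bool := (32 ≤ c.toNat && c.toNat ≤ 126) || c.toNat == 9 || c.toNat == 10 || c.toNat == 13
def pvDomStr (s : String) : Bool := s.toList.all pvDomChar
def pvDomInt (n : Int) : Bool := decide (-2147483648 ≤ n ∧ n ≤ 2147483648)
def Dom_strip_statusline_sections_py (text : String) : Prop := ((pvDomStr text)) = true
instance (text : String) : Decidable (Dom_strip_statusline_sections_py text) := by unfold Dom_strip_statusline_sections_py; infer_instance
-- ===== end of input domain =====

-- B groups the lines into a preamble plus header-led sections, then filters the sections; same result as A's skip-flag scan ("alternative" decomposition, no speed claim).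

-- ===== PORT A =====
def pvHdrsA : PySem.Set String :=
  PySem.Set.ofList ["[statusline]", "[statusline.cache]", "[statusline.thresholds]"]

def pvStepA (st : List String × Option String) (line : String) : List String × Option String :=
  let sl := PySem.Str.strip line
  if sl ∈ pvHdrsA then (st.1, some "statusline")
  else if sl = "[[context_window]]" then (st.1, some "context_window")
  else
    let skip := if PySem.Str.startswith sl "[" && st.2.isSome then none else st.2
    if skip.isNone then (st.1 ++ [line], skip) else (st.1, skip)

def strip_statusline_sections_py (text : String) : String :=
  let lines := PySem.Str.splitlines text
  let st := lines.foldl pvStepA ([], none)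
  PySem.Str.strip (PySem.Str.join "\n" st.1)

-- ===== PORT B =====
def pvSkipB : PySem.Set String :=
  PySem.Set.ofList ["[statusline]", "[statusline.cache]", "[statusline.thresholds]", "[[context_window]]"]

def pvStepB (st : List String × List (List String) × Option (List String)) (line : String) :
    List String × List (List String) × Option (List String) :=
  if PySem.Str.startswith (PySem.Str.strip line) "[" then
    (st.1, st.2.1 ++ st.2.2.toList, some [line])
  else
    match st.2.2 with
    | none => (st.1 ++ [line], st.2.1, none)
    | some c => (st.1, st.2.1, some (c ++ [line]))

def strip_statusline_sections_py_alt (text : String) : String :=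
  let lines := PySem.Str.splitlines text
  let st := lines.foldl pvStepB ([], [], none)
  let secs := st.2.1 ++ st.2.2.toList
  let kept := secs.foldl
    (fun acc sec => if PySem.Str.strip sec.headI ∈ pvSkipB then acc else acc ++ sec) st.1
  PySem.Str.strip (PySem.Str.join "\n" kept)

-- ===== PRECONDITION & SPEC =====
def Spec_strip_statusline_sections_py (text : String) (out : String) : Prop := out = strip_statusline_sections_py_alt text
instance (text : String) (out : String) : Decidable (Spec_strip_statusline_sections_py text out) := by unfold Spec_strip_statusline_sections_py; infer_instance

-- ===== CLAIM (what is proved, stated in full; the proofs are below) =====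
def Claim_equal_strip_statusline_sections_py : Prop := ∀ (text : String), Dom_strip_statusline_sections_py text → Spec_strip_statusline_sections_py text (strip_statusline_sections_py text)

-- ===== LEMMAS AND PROOFS =====

def pvKeep (c : List String) : Bool := decide (PySem.Str.strip c.headI ∉ pvSkipB)

def pvCurKept (cur : Option (List String)) : List String :=
  match cur with
  | none => []
  | some c => if pvKeep c then c else []

def pvInv (acc : List String) (skip : Option String)
    (pre : List String) (secs : List (List String)) (cur : Option (List String)) : Prop :=
  acc = pre ++ (secs.filter pvKeep).flatten ++ pvCurKept cur
  ∧ (match cur with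
     | none => skip = none ∧ secs = []
     | some c => (skip = none ↔ pvKeep c = true) ∧ c ≠ [])

lemma pv_memA {s : String} (h : s ∈ pvHdrsA) :
    s ∈ pvSkipB ∧ PySem.Str.startswith s "[" = true := by
  simp [pvHdrsA, PySem.Set.mem_ofList] at h
  rcases h with rfl | rfl | rfl <;> exact ⟨by decide, by decide⟩

lemma pv_not_start {s : String} (h : PySem.Str.startswith s "[" = false) : s ∉ pvSkipB := by
  intro hm
  simp [pvSkipB, PySem.Set.mem_ofList] at hm
  rcases hm with rfl | rfl | rfl | rfl <;> revert h <;> decide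

lemma pvCurKept_eq (cur : Option (List String)) :
    pvCurKept cur = (cur.toList.filter pvKeep).flatten := by
  cases cur with
  | none => rfl
  | some c => by_cases h : pvKeep c = true <;> simp [pvCurKept, h]

lemma pv_flatten_cur (secs : List (List String)) (cur : Option (List String)) :
    ((secs ++ cur.toList).filter pvKeep).flatten
      = (secs.filter pvKeep).flatten ++ pvCurKept cur := by
  simp [List.filter_append, pvCurKept_eq]

lemma pvKeep_single {line : String} :
    pvKeep [line] = decide (PySem.Str.strip line ∉ pvSkipB) := by simp [pvKeep]

lemma pvKeep_append {c : List String} (line : String) (hne : c ≠ []) :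
    pvKeep (c ++ [line]) = pvKeep c := by
  cases c with
  | nil => exact absurd rfl hne
  | cons a t => simp [pvKeep]

lemma pv_step (line : String) (acc : List String) (skip : Option String)
    (pre : List String) (secs : List (List String)) (cur : Option (List String))
    (h : pvInv acc skip pre secs cur) :
    pvInv (pvStepA (acc, skip) line).1 (pvStepA (acc, skip) line).2
      (pvStepB (pre, secs, cur) line).1 (pvStepB (pre, secs, cur) line).2.1
      (pvStepB (pre, secs, cur) line).2.2 := by
  obtain ⟨hacc, hsk⟩ := h
  by_cases hA : PySem.Str.strip line ∈ pvHdrsA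
  · -- statusline header: dropped by A, starts a dropped section in B
    have hmem := (pv_memA hA).1
    have hstart := (pv_memA hA).2
    have eA : pvStepA (acc, skip) line = (acc, some "statusline") := by
      simp only [pvStepA]; rw [if_pos hA]
    have eB : pvStepB (pre, secs, cur) line = (pre, secs ++ cur.toList, some [line]) := by
      simp only [pvStepB]; rw [hstart]; simp
    rw [eA, eB]
    refine ⟨?_, ?_, by simp⟩
    · rw [hacc, pv_flatten_cur]
      simp [pvCurKept, pvKeep_single, hmem]
    · simp [pvKeep_single, hmem]
  · by_cases hC : PySem.Str.strip line = "[[context_window]]"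
    · have hmem : PySem.Str.strip line ∈ pvSkipB := by rw [hC]; decide
      have hstart : PySem.Str.startswith (PySem.Str.strip line) "[" = true := by
        rw [hC]; decide
      have eA : pvStepA (acc, skip) line = (acc, some "context_window") := by
        simp only [pvStepA]; rw [if_neg hA, if_pos hC]
      have eB : pvStepB (pre, secs, cur) line = (pre, secs ++ cur.toList, some [line]) := by
        simp only [pvStepB]; rw [hstart]; simp
      rw [eA, eB]
      refine ⟨?_, ?_, by simp⟩
      · rw [hacc, pv_flatten_cur]
        simp [pvCurKept, pvKeep_single, hmem]
      · simp [pvKeep_single, hmem]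
    · by_cases hstart : PySem.Str.startswith (PySem.Str.strip line) "[" = true
      · -- ordinary header: kept, ends any skipped block
        have hmem : PySem.Str.strip line ∉ pvSkipB := by
          intro hm
          simp [pvSkipB, PySem.Set.mem_ofList] at hm
          rcases hm with hm | hm | hm | hm
          · exact hA (by rw [hm]; simp [pvHdrsA, PySem.Set.mem_ofList])
          · exact hA (by rw [hm]; simp [pvHdrsA, PySem.Set.mem_ofList])
          · exact hA (by rw [hm]; simp [pvHdrsA, PySem.Set.mem_ofList])
          · exact hC hm
        have eA : pvStepA (acc, skip) line = (acc ++ [line], none) := by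
          cases skip <;> (simp only [pvStepA]; rw [if_neg hA, if_neg hC, hstart]; simp)
        have eB : pvStepB (pre, secs, cur) line = (pre, secs ++ cur.toList, some [line]) := by
          simp only [pvStepB]; rw [hstart]; simp
        rw [eA, eB]
        refine ⟨?_, ?_, by simp⟩
        · rw [hacc, pv_flatten_cur]
          simp [pvCurKept, pvKeep_single, hmem]
        · simp [pvKeep_single, hmem]
      · -- body line
        have hstart' : PySem.Str.startswith (PySem.Str.strip line) "[" = false := by
          simpa using hstart
        have hmem : PySem.Str.strip line ∉ pvSkipB := pv_not_start hstart'
        cases cur with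
        | none =>
          obtain ⟨hsk, hsecs⟩ := hsk
          subst hsk
          subst hsecs
          have eA : pvStepA (acc, none) line = (acc ++ [line], none) := by
            simp only [pvStepA]; rw [if_neg hA, if_neg hC, hstart']; simp
          have eB : pvStepB (pre, [], none) line = (pre ++ [line], [], none) := by
            simp only [pvStepB]; rw [hstart']; simp
          rw [eA, eB]
          exact ⟨by simp [hacc, pvCurKept], rfl, rfl⟩
        | some c =>
          obtain ⟨hiff, hne⟩ := hsk
          have eB : pvStepB (pre, secs, some c) line = (pre, secs, some (c ++ [line])) := by
            simp only [pvStepB]; rw [hstart']; simp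
          by_cases hk : pvKeep c = true
          · have hsn : skip = none := hiff.mpr hk
            subst hsn
            have eA : pvStepA (acc, none) line = (acc ++ [line], none) := by
              simp only [pvStepA]; rw [if_neg hA, if_neg hC, hstart']; simp
            rw [eA, eB]
            refine ⟨?_, ?_, by simp⟩
            · simp [hacc, pvCurKept, pvKeep_append line hne, hk]
            · simp [pvKeep_append line hne, hk]
          · have hkf : pvKeep c = false := by simpa using hk
            cases skip with
            | none => exact absurd (hiff.mp rfl) hk
            | some sk =>
              have eA : pvStepA (acc, some sk) line = (acc, some sk) := by
                simp only [pvStepA]; rw [if_neg hA, if_neg hC, hstart']; simp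
              rw [eA, eB]
              refine ⟨?_, ?_, by simp⟩
              · simp [hacc, pvCurKept, pvKeep_append line hne, hkf]
              · simp [pvKeep_append line hne, hkf]

lemma pv_loop (lines : List String) :
    ∀ acc skip pre secs cur, pvInv acc skip pre secs cur →
      pvInv (lines.foldl pvStepA (acc, skip)).1 (lines.foldl pvStepA (acc, skip)).2
        (lines.foldl pvStepB (pre, secs, cur)).1
        (lines.foldl pvStepB (pre, secs, cur)).2.1
        (lines.foldl pvStepB (pre, secs, cur)).2.2 := by
  induction lines with
  | nil => intro acc skip pre secs cur h; simpa using h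
  | cons l ls ih =>
    intro acc skip pre secs cur h
    have h' := pv_step l acc skip pre secs cur h
    simpa using ih _ _ _ _ _ h'

lemma pv_foldl_filter (secs : List (List String)) (pre : List String) :
    secs.foldl
      (fun acc sec => if PySem.Str.strip sec.headI ∈ pvSkipB then acc else acc ++ sec) pre
      = pre ++ (secs.filter pvKeep).flatten := by
  induction secs generalizing pre with
  | nil => simp
  | cons s t ih =>
    by_cases h : PySem.Str.strip s.headI ∈ pvSkipB
    · simp [ih, List.filter, pvKeep, h]
    · simp [ih, List.filter, pvKeep, h]

-- ===== VERDICT (by name: the statement is the Claim_ definition above) =====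
theorem strip_statusline_sections_py_spec : Claim_equal_strip_statusline_sections_py := by
  intro text _
  show _ = _
  unfold strip_statusline_sections_py strip_statusline_sections_py_alt
  have h := pv_loop (PySem.Str.splitlines text) [] none [] [] none ⟨by simp [pvCurKept], rfl, rfl⟩
  obtain ⟨hacc, -⟩ := h
  simp only [pv_foldl_filter, hacc, pv_flatten_cur, List.append_assoc]
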